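-- pv_equiv track=rewrite | github.com/OnDefend/Dyna-Defcon-33 | core/config_management/config_validator.py | _detect_config_type
-- ===== SOURCE A (Python) =====
-- from typing import Dict, List, Optional, Any, Union, Tuple
--
-- def _detect_config_type(config_data: Dict[str, Any]) -> str:
--     """Detect configuration type from data structure."""
--     if 'plugin_name' in config_data:
--         return 'plugin_config'
--     elif any(key in config_data for key in ['root_detection', 'debugger_detection', 'crypto_patterns']):
--         return 'pattern_config'
--     elif 'scan_config' in config_data or 'performance_config' in config_data:
--         return 'analysis_config'
--     else:
--         return 'unknown'
-- ===== SOURCE B (Python) =====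
-- _KEY_RANK = {
--     'plugin_name': 0,
--     'root_detection': 1, 'debugger_detection': 1, 'crypto_patterns': 1,
--     'scan_config': 2, 'performance_config': 2,
-- }
-- _LABELS = ['plugin_config', 'pattern_config', 'analysis_config', 'unknown']
--
--
-- def _detect_config_type(config_data):
--     """Single pass over the dict's keys: fold the minimum priority rank."""
--     best = 3
--     for key in config_data:
--         best = min(best, _KEY_RANK.get(key, 3))
--     return _LABELS[best]
-- ===== Notes on version B (the rewrite author's own statement) =====
-- stated objective: alternative
-- what changed: Inverts the traversal: instead of A's if/elif cascade testing each rule key against the dict, B makes one pass over the dict's own keys, mapping each to a numeric priority rank via a lookup table and folding the minimum; the final rank indexes the label list.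
import Mathlib
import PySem

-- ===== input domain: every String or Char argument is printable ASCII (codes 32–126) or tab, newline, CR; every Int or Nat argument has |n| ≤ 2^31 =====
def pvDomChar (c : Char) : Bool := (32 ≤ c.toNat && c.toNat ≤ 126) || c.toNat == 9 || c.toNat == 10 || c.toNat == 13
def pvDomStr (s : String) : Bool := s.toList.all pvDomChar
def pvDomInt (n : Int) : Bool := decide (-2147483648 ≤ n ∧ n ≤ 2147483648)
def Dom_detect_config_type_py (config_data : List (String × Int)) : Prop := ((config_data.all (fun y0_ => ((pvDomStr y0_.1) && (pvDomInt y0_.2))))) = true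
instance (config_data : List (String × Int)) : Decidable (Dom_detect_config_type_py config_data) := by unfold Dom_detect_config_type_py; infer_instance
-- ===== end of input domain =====

-- B inverts the traversal: one pass over the dict's keys folding a minimum priority rank,
-- instead of A's if/elif cascade of membership tests (alternative decomposition, same behaviour).

-- ===== PORT A =====
-- 'key in config_data' on a dict = membership among the keys (first components)
def pvKeyIn (config_data : List (String × Int)) (k : String) : Bool :=
  config_data.any (fun p => p.1 == k)

def detect_config_type_py (config_data : List (String × Int)) : String :=
  if pvKeyIn config_data "plugin_name" then
    "plugin_config"
  else if (["root_detection", "debugger_detection", "crypto_patterns"].any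
            (fun key => pvKeyIn config_data key)) then
    "pattern_config"
  else if pvKeyIn config_data "scan_config" || pvKeyIn config_data "performance_config" then
    "analysis_config"
  else
    "unknown"

-- ===== PORT B =====
-- _KEY_RANK (a dict literal with distinct keys; .get(k, 3) = first-match lookup with default)
def pvKeyRankDict : List (String × Nat) :=
  [("plugin_name", 0),
   ("root_detection", 1), ("debugger_detection", 1), ("crypto_patterns", 1),
   ("scan_config", 2), ("performance_config", 2)]

-- _KEY_RANK.get(k, 3)
def pvRankOf (k : String) : Nat :=
  ((pvKeyRankDict.find? (fun p => p.1 == k)).map Prod.snd).getD 3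

-- _LABELS
def pvLabels : List String :=
  ["plugin_config", "pattern_config", "analysis_config", "unknown"]

-- for key in config_data: best = min(best, _KEY_RANK.get(key, 3)); return _LABELS[best]
def detect_config_type_py_alt (config_data : List (String × Int)) : String :=
  let best := config_data.foldl (fun b p => min b (pvRankOf p.1)) 3
  pvLabels.getD best "unknown"

-- ===== PRECONDITION & SPEC =====
def Spec_detect_config_type_py (config_data : List (String × Int)) (out : String) : Prop := out = detect_config_type_py_alt config_data
instance (config_data : List (String × Int)) (out : String) : Decidable (Spec_detect_config_type_py config_data out) := by unfold Spec_detect_config_type_py; infer_instance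

-- ===== CLAIM (what is proved, stated in full; the proofs are below) =====
def Claim_equal_detect_config_type_py : Prop := ∀ (config_data : List (String × Int)), Dom_detect_config_type_py config_data → Spec_detect_config_type_py config_data (detect_config_type_py config_data)

-- ===== LEMMAS AND PROOFS =====

-- pvRankOf, written as the equality cascade it encodes
lemma pvRankOf_eq (k : String) :
    pvRankOf k = (if k = "plugin_name" then 0
      else if k = "root_detection" ∨ k = "debugger_detection" ∨ k = "crypto_patterns" then 1
      else if k = "scan_config" ∨ k = "performance_config" then 2 else 3) := by
  simp only [pvRankOf, pvKeyRankDict, List.find?]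
  split_ifs with h1 h2 h3
  · subst h1; decide
  · rcases h2 with h | h | h <;> subst h <;> decide
  · rcases h3 with h | h <;> subst h <;> decide
  · push Not at h2 h3
    rw [show ("plugin_name" == k) = false from beq_eq_false_iff_ne.mpr (fun h => h1 h.symm),
        show ("root_detection" == k) = false from beq_eq_false_iff_ne.mpr (fun h => h2.1 h.symm),
        show ("debugger_detection" == k) = false from beq_eq_false_iff_ne.mpr (fun h => h2.2.1 h.symm),
        show ("crypto_patterns" == k) = false from beq_eq_false_iff_ne.mpr (fun h => h2.2.2 h.symm),
        show ("scan_config" == k) = false from beq_eq_false_iff_ne.mpr (fun h => h3.1 h.symm),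
        show ("performance_config" == k) = false from beq_eq_false_iff_ne.mpr (fun h => h3.2 h.symm)]
    rfl

lemma pvRankOf_le (k : String) : pvRankOf k ≤ 3 := by
  rw [pvRankOf_eq]; split_ifs <;> omega

-- A's cascade as a rank value
def pvCval (l : List (String × Int)) : Nat :=
  if pvKeyIn l "plugin_name" then 0
  else if pvKeyIn l "root_detection" || pvKeyIn l "debugger_detection" || pvKeyIn l "crypto_patterns" then 1
  else if pvKeyIn l "scan_config" || pvKeyIn l "performance_config" then 2
  else 3

lemma pvCval_cons (x : String × Int) (xs : List (String × Int)) :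
    pvCval (x :: xs) = min (pvRankOf x.1) (pvCval xs) := by
  have hx : ∀ k, pvKeyIn (x :: xs) k = ((x.1 == k) || pvKeyIn xs k) := by
    intro k; simp [pvKeyIn, List.any_cons]
  simp only [pvCval, pvRankOf_eq x.1, hx, Bool.or_eq_true, beq_iff_eq]
  split_ifs <;> simp_all <;> omega

lemma pvCval_le (l : List (String × Int)) : pvCval l ≤ 3 := by
  unfold pvCval; split_ifs <;> omega

-- loop invariant: B's fold computes min of the accumulator and the cascade rank
lemma pvFold_char (l : List (String × Int)) (b : Nat) (hb : b ≤ 3) :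
    l.foldl (fun b p => min b (pvRankOf p.1)) b = min b (pvCval l) := by
  induction l generalizing b with
  | nil => simp only [List.foldl_nil, pvCval, pvKeyIn, List.any_nil]; simp; omega
  | cons x xs ih =>
    have hr := pvRankOf_le x.1
    simp only [List.foldl_cons, ih (min b (pvRankOf x.1)) (by omega), pvCval_cons]
    omega

-- ===== VERDICT (by name: the statement is the Claim_ definition above) =====
theorem detect_config_type_py_spec : Claim_equal_detect_config_type_py := by
  intro config_data _
  unfold Spec_detect_config_type_py detect_config_type_py detect_config_type_py_alt
  rw [pvFold_char config_data 3 (le_refl 3),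
      show min 3 (pvCval config_data) = pvCval config_data by
        have := pvCval_le config_data; omega]
  unfold pvCval
  simp only [List.any_cons, List.any_nil, Bool.or_false]
  split_ifs <;> simp_all [pvLabels]
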